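-- pv_equiv track=rewrite | github.com/alp-kudzai/AOC-day3 | day3.py | findCommonBits2
-- ===== SOURCE A (Python) =====
-- def findCommonBits2(input: list, count: list):
--         '''
--             Given a list of 0 or 1s find the most common bit recursely
--         '''
--         if input == []:
--             if count[0] > count[1]:
--                 return '0'
--             else:
--                 return '1'
--         if input[0] == '0':
--             count[0] += 1
--         else:
--             count[1] += 1
--         return findCommonBits2(input[1:], count)
-- ===== SOURCE B (Python) =====
-- def findCommonBits2(input: list, count: list):
--     '''Iterative re-implementation: one for-loop over the bits, mutating count
--     in place, then a single comparison (same '>' tie-break as A).'''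
--     for bit in input:
--         if bit == '0':
--             count[0] += 1
--         else:
--             count[1] += 1
--     return '0' if count[0] > count[1] else '1'
-- ===== Notes on version B (the rewrite author's own statement) =====
-- stated objective: faster
-- what changed: Replaces the recursion that rebuilds input[1:] on every call with a single iterative for-loop over the bits (no list copies, no recursion-depth limit), keeping the same in-place mutation of count and the same tie-break.
import Mathlib
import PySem

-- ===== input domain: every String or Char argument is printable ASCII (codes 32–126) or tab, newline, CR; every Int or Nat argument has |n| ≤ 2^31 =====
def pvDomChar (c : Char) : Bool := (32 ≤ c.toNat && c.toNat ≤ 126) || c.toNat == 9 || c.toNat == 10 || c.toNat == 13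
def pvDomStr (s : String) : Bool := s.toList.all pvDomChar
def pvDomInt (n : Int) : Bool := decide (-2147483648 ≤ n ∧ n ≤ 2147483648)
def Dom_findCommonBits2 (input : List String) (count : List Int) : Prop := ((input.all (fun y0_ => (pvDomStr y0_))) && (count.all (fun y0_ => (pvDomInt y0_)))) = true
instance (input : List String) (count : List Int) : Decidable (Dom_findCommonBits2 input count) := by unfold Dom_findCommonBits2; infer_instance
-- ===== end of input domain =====

-- B replaces A's recursion over input[1:] by a single for-loop; both mutate `count`
-- in place in Python identically, and the theorems here are about the return value.

-- ===== PORT A =====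
-- A: recursive — base case compares count[0] > count[1]; otherwise bump count[0]
-- or count[1] and recurse on input[1:] (here the tail of the list).
def findCommonBits2 : List String → List Int → String
  | [], count =>
      if PySem.List.pyGetD count 0 0 > PySem.List.pyGetD count 1 0 then "0" else "1"
  | x :: rest, count =>
      if x = "0" then
        findCommonBits2 rest (PySem.List.pySetD count 0 (PySem.List.pyGetD count 0 0 + 1))
      else
        findCommonBits2 rest (PySem.List.pySetD count 1 (PySem.List.pyGetD count 1 0 + 1))

-- ===== PORT B =====
-- B: one fold over the bits updating count, then a single comparison.
def findCommonBits2_alt (input : List String) (count : List Int) : String :=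
  let c := input.foldl
    (fun c bit =>
      if bit = "0" then PySem.List.pySetD c 0 (PySem.List.pyGetD c 0 0 + 1)
      else PySem.List.pySetD c 1 (PySem.List.pyGetD c 1 0 + 1)) count
  if PySem.List.pyGetD c 0 0 > PySem.List.pyGetD c 1 0 then "0" else "1"

-- ===== PRECONDITION & SPEC =====
-- Pre_: Python A indexes count[0] and count[1] (reads and writes), so it raises
-- IndexError whenever count has fewer than two elements; exactly those inputs are excluded.
def Pre_findCommonBits2 (input : List String) (count : List Int) : Prop := 2 ≤ count.length
instance (input : List String) (count : List Int) : Decidable (Pre_findCommonBits2 input count) := by unfold Pre_findCommonBits2; infer_instance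
def pvWitness_findCommonBits2 : List String × List Int := (["0", "1", "1"], [0, 0])

def Spec_findCommonBits2 (input : List String) (count : List Int) (out : String) : Prop := out = findCommonBits2_alt input count
instance (input : List String) (count : List Int) (out : String) : Decidable (Spec_findCommonBits2 input count out) := by unfold Spec_findCommonBits2; infer_instance

-- ===== CLAIM (what is proved, stated in full; the proofs are below) =====
def Claim_equal_findCommonBits2 : Prop := ∀ (input : List String) (count : List Int), Dom_findCommonBits2 input count → Pre_findCommonBits2 input count → Spec_findCommonBits2 input count (findCommonBits2 input count)

-- ===== LEMMAS AND PROOFS =====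
-- A's recursion computes the same value as B's fold, for every count.
theorem findCommonBits2_eq_alt (input : List String) (count : List Int) :
    findCommonBits2 input count = findCommonBits2_alt input count := by
  induction input generalizing count with
  | nil => rfl
  | cons x rest ih =>
      simp only [findCommonBits2, findCommonBits2_alt, List.foldl_cons]
      split <;> exact ih _

-- ===== VERDICT (by name: the statement is the Claim_ definition above) =====
theorem findCommonBits2_spec : Claim_equal_findCommonBits2 := by
  intro input count _ _
  exact findCommonBits2_eq_alt input count
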